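-- pv_equiv track=rewrite | github.com/wilburnlab/constellation | constellation/viz/raster/datashader_png.py | greedy_row_assign
-- ===== SOURCE A (Python) =====
-- def greedy_row_assign(starts, ends) -> list[int]:
--     """Greedy row assignment for visible reads.
--
--     Sorts reads by `start` and places each in the lowest-numbered row
--     whose previous read's `end` is `<=` this read's `start`. Returns
--     the row index for each input read in input order.
--
--     Used by both the vector and hybrid renderers so the row assignment
--     is identical regardless of which mode the kernel ships — zooming
--     in (vector) and zooming out (hybrid) preserve the visual layout.
--     """
--     if len(starts) == 0:
--         return []
--     if len(starts) != len(ends):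
--         raise ValueError("starts and ends must have equal length")
--     n = len(starts)
--     indexed = sorted(range(n), key=lambda i: (int(starts[i]), int(ends[i])))
--     row_ends: list[int] = []
--     rows = [0] * n
--     for i in indexed:
--         s = int(starts[i])
--         e = int(ends[i])
--         placed = False
--         for r, ridx in enumerate(row_ends):
--             if ridx <= s:
--                 row_ends[r] = e
--                 rows[i] = r
--                 placed = True
--                 break
--         if not placed:
--             rows[i] = len(row_ends)
--             row_ends.append(e)
--     return rows
-- ===== SOURCE B (Python) =====
-- def _insort(xs, x):
--     """Insert x into ascending-sorted list xs, keeping it sorted (before first >= element)."""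
--     i = 0
--     while i < len(xs) and xs[i] < x:
--         i += 1
--     xs.insert(i, x)
--
--
-- def greedy_row_assign(starts, ends) -> list[int]:
--     """Greedy row assignment: pool-based sweep instead of rescanning every row.
--
--     Keeps two sorted pools: `busy` rows ordered by (end, row) and `free`
--     row indices; as the sweep reaches each start, rows whose end has
--     passed move from busy to free, and the read takes the smallest free
--     row (or opens a new one).
--     """
--     if len(starts) == 0:
--         return []
--     if len(starts) != len(ends):
--         raise ValueError("starts and ends must have equal length")
--     n = len(starts)
--     indexed = sorted(range(n), key=lambda i: (int(starts[i]), int(ends[i])))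
--     rows = [0] * n
--     busy = []  # (end, row), ascending
--     free = []  # row indices, ascending
--     k = 0      # number of rows opened so far
--     for i in indexed:
--         s = int(starts[i])
--         e = int(ends[i])
--         while busy and busy[0][0] <= s:
--             _insort(free, busy.pop(0)[1])
--         if free:
--             r = free.pop(0)
--         else:
--             r = k
--             k += 1
--         rows[i] = r
--         _insort(busy, (e, r))
--     return rows
-- ===== Notes on version B (the rewrite author's own statement) =====
-- stated objective: alternative
-- what changed: A rescans the whole row_ends array from row 0 for every read; B sweeps the reads keeping two sorted pools (busy rows keyed by (end,row), free row indices), moving rows whose end has passed from busy to free and taking the smallest free row, so no per-read scan over all rows remains.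
import Mathlib
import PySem

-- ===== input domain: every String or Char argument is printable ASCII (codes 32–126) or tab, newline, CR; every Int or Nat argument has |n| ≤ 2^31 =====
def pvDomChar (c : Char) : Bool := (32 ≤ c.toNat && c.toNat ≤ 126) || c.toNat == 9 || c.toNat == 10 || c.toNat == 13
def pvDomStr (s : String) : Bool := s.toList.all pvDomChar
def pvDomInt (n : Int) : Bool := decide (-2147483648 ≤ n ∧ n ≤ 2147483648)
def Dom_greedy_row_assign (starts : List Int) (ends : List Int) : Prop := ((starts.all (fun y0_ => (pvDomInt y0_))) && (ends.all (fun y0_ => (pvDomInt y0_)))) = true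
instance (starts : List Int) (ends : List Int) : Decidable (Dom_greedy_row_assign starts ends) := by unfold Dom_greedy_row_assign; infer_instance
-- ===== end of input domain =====

-- B replaces A's per-read scan over all row ends by two sorted pools (busy rows ordered
-- by (end,row), free row indices); equivalence of the return values is proved on Pre_.

-- ===== PORT A =====
-- A's inner `for r, ridx in enumerate(row_ends): if ridx <= s: … break`: first row with end ≤ s.
def pvScanA (re : List Int) (s : Int) : Option Nat :=
  match re with
  | [] => none
  | en :: t => if en ≤ s then some 0 else (pvScanA t s).map (· + 1)

-- one iteration of A's `for i in indexed` loop; state = (row_ends, rows)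
def pvStepA (starts ends : List Int) (st : List Int × List Int) (i : Int) : List Int × List Int :=
  let s := PySem.List.pyGetD starts i 0
  let e := PySem.List.pyGetD ends i 0
  match pvScanA st.1 s with
  | some r => (st.1.set r e, st.2.set i.toNat (r : Int))
  | none => (st.1 ++ [e], st.2.set i.toNat (st.1.length : Int))

def greedy_row_assign (starts : List Int) (ends : List Int) : List Int :=
  if starts.length = 0 then [] else
    let indexed := PySem.List.sorted2 (PySem.List.pyRange 0 (starts.length : Int))
      (fun i => PySem.List.pyGetD starts i 0) (fun i => PySem.List.pyGetD ends i 0)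
    (indexed.foldl (pvStepA starts ends) ([], List.replicate starts.length 0)).2

-- ===== PORT B =====
-- Source B's `_insort` on a list of ints (insert before the first element ≥ x)
def pvInsortInt (xs : List Int) (x : Int) : List Int :=
  match xs with
  | [] => [x]
  | y :: t => if y < x then y :: pvInsortInt t x else x :: y :: t

-- Python's `<` on (end, row) pairs: lexicographic
def pvLtPair (p q : Int × Int) : Bool := p.1 < q.1 || (p.1 == q.1 && p.2 < q.2)

-- Source B's `_insort` on the busy list of (end, row) pairs
def pvInsortPair (xs : List (Int × Int)) (x : Int × Int) : List (Int × Int) :=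
  match xs with
  | [] => [x]
  | y :: t => if pvLtPair y x then y :: pvInsortPair t x else x :: y :: t

-- Source B's `while busy and busy[0][0] <= s: _insort(free, busy.pop(0)[1])`
def pvDrain (busy : List (Int × Int)) (free : List Int) (s : Int) : List (Int × Int) × List Int :=
  match busy with
  | [] => ([], free)
  | p :: t => if p.1 ≤ s then pvDrain t (pvInsortInt free p.2) s else (p :: t, free)

-- one iteration of Source B's `for i in indexed` loop; state = (busy, free, rows, k)
def pvStepB (starts ends : List Int) (st : List (Int × Int) × List Int × List Int × Int) (i : Int) :
    List (Int × Int) × List Int × List Int × Int :=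
  let s := PySem.List.pyGetD starts i 0
  let e := PySem.List.pyGetD ends i 0
  let bf := pvDrain st.1 st.2.1 s
  match bf.2 with
  | r :: rest => (pvInsortPair bf.1 (e, r), rest, st.2.2.1.set i.toNat r, st.2.2.2)
  | [] => (pvInsortPair bf.1 (e, st.2.2.2), [], st.2.2.1.set i.toNat st.2.2.2, st.2.2.2 + 1)

def greedy_row_assign_alt (starts : List Int) (ends : List Int) : List Int :=
  if starts.length = 0 then [] else
    let indexed := PySem.List.sorted2 (PySem.List.pyRange 0 (starts.length : Int))
      (fun i => PySem.List.pyGetD starts i 0) (fun i => PySem.List.pyGetD ends i 0)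
    (indexed.foldl (pvStepB starts ends) ([], [], List.replicate starts.length 0, 0)).2.2.1

-- ===== PRECONDITION & SPEC =====
-- Pre_ excludes only the inputs on which A raises ValueError: nonempty `starts` whose length differs from `ends`.
def Pre_greedy_row_assign (starts : List Int) (ends : List Int) : Prop :=
  starts = [] ∨ starts.length = ends.length
instance (starts : List Int) (ends : List Int) : Decidable (Pre_greedy_row_assign starts ends) := by
  unfold Pre_greedy_row_assign; infer_instance

def pvWitness_greedy_row_assign : List Int × List Int := ([1, 2, 1], [4, 3, 2])

def Spec_greedy_row_assign (starts : List Int) (ends : List Int) (out : List Int) : Prop :=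
  out = greedy_row_assign_alt starts ends
instance (starts : List Int) (ends : List Int) (out : List Int) : Decidable (Spec_greedy_row_assign starts ends out) := by
  unfold Spec_greedy_row_assign; infer_instance

-- ===== CLAIM (what is proved, stated in full; the proofs are below) =====
def Claim_equal_greedy_row_assign : Prop := ∀ (starts : List Int) (ends : List Int), Dom_greedy_row_assign starts ends → Pre_greedy_row_assign starts ends → Spec_greedy_row_assign starts ends (greedy_row_assign starts ends)

-- ===== LEMMAS AND PROOFS =====

-- ========== insort Int ==========
theorem mem_pvInsortInt (xs : List Int) (x w : Int) : w ∈ pvInsortInt xs x ↔ w = x ∨ w ∈ xs := by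
  induction xs with
  | nil => simp [pvInsortInt]
  | cons y t ih =>
    simp only [pvInsortInt]
    split
    · simp [ih]
      tauto
    · simp

theorem perm_pvInsortInt (xs : List Int) (x : Int) : (pvInsortInt xs x).Perm (x :: xs) := by
  induction xs with
  | nil => simp [pvInsortInt]
  | cons y t ih =>
    simp only [pvInsortInt]
    split
    · exact ((ih.cons y).trans (List.Perm.swap x y t))
    · exact List.Perm.refl _

theorem pairwise_pvInsortInt (xs : List Int) (x : Int) (h : xs.Pairwise (· < ·)) (hx : x ∉ xs) :
    (pvInsortInt xs x).Pairwise (· < ·) := by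
  induction xs with
  | nil => simp [pvInsortInt]
  | cons y t ih =>
    rw [List.pairwise_cons] at h
    simp only [List.mem_cons, not_or] at hx
    simp only [pvInsortInt]
    split
    · rename_i hyx
      rw [List.pairwise_cons]
      constructor
      · intro w hw
        rcases (mem_pvInsortInt t x w).1 hw with rfl | hw
        · exact hyx
        · exact h.1 w hw
      · exact ih h.2 hx.2
    · rename_i hyx
      have hyx : x ≤ y := by omega
      rw [List.pairwise_cons]
      refine ⟨?_, List.pairwise_cons.2 h⟩
      intro w hw
      rcases List.mem_cons.1 hw with rfl | hw
      · rcases lt_or_eq_of_le hyx with h' | h'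
        · exact h'
        · exact absurd h' hx.1
      · exact lt_of_le_of_lt hyx (h.1 w hw)

-- ========== insort Pair ==========
theorem mem_pvInsortPair (xs : List (Int × Int)) (x w : Int × Int) :
    w ∈ pvInsortPair xs x ↔ w = x ∨ w ∈ xs := by
  induction xs with
  | nil => simp [pvInsortPair]
  | cons y t ih =>
    simp only [pvInsortPair]
    split
    · simp [ih]
      tauto
    · simp

theorem perm_pvInsortPair (xs : List (Int × Int)) (x : Int × Int) :
    (pvInsortPair xs x).Perm (x :: xs) := by
  induction xs with
  | nil => simp [pvInsortPair]
  | cons y t ih =>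
    simp only [pvInsortPair]
    split
    · exact ((ih.cons y).trans (List.Perm.swap x y t))
    · exact List.Perm.refl _

theorem pvLtPair_le {p q : Int × Int} (h : pvLtPair p q = true) : p.1 ≤ q.1 := by
  simp only [pvLtPair, Bool.or_eq_true, Bool.and_eq_true, decide_eq_true_eq, beq_iff_eq] at h
  omega

theorem pvLtPair_not_le {p q : Int × Int} (h : ¬ pvLtPair p q = true) : q.1 ≤ p.1 := by
  simp only [pvLtPair, Bool.or_eq_true, Bool.and_eq_true, decide_eq_true_eq, beq_iff_eq] at h
  omega

theorem pairwise_pvInsortPair (xs : List (Int × Int)) (x : Int × Int)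
    (h : xs.Pairwise (fun p q => p.1 ≤ q.1)) :
    (pvInsortPair xs x).Pairwise (fun p q => p.1 ≤ q.1) := by
  induction xs with
  | nil => simp [pvInsortPair]
  | cons y t ih =>
    rw [List.pairwise_cons] at h
    simp only [pvInsortPair]
    split
    · rename_i hyx
      rw [List.pairwise_cons]
      constructor
      · intro w hw
        rcases (mem_pvInsortPair t x w).1 hw with rfl | hw
        · exact pvLtPair_le hyx
        · exact h.1 w hw
      · exact ih h.2
    · rename_i hyx
      rw [List.pairwise_cons]
      refine ⟨?_, List.pairwise_cons.2 h⟩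
      intro w hw
      rcases List.mem_cons.1 hw with rfl | hw
      · exact pvLtPair_not_le hyx
      · exact le_trans (pvLtPair_not_le hyx) (h.1 w hw)

-- ========== pvScanA ==========
theorem pvScanA_some_of {re : List Int} {s : Int} {j : Nat} (h1 : j < re.length)
    (h2 : re.getD j 0 ≤ s) (h3 : ∀ j' < j, ¬ re.getD j' 0 ≤ s) : pvScanA re s = some j := by
  induction re generalizing j with
  | nil => simp at h1
  | cons en t ih =>
    simp only [pvScanA]
    cases j with
    | zero =>
      simp only [List.getD_cons_zero] at h2
      simp [h2]
    | succ j0 =>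
      have hen : ¬ en ≤ s := by simpa using h3 0 (by omega)
      rw [if_neg hen]
      rw [ih (by simpa using h1) (by simpa using h2) (fun j' hj' => by simpa using h3 (j'+1) (by omega))]
      rfl

theorem pvScanA_none_of {re : List Int} {s : Int} (h : ∀ j < re.length, ¬ re.getD j 0 ≤ s) :
    pvScanA re s = none := by
  induction re with
  | nil => rfl
  | cons en t ih =>
    simp only [pvScanA]
    rw [if_neg (by simpa using h 0 (by simp))]
    rw [ih (fun j hj => by simpa using h (j+1) (by simpa using hj))]
    rfl

-- ========== pvDrain ==========
theorem pvDrain_spec (s : Int) : ∀ (busy : List (Int × Int)) (free : List Int),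
    busy.Pairwise (fun p q => p.1 ≤ q.1) → free.Pairwise (· < ·) →
    (free ++ busy.map Prod.snd).Nodup →
    ((pvDrain busy free s).2.Pairwise (· < ·)) ∧
    ((pvDrain busy free s).1.Pairwise (fun p q => p.1 ≤ q.1)) ∧
    (∀ p ∈ (pvDrain busy free s).1, ¬ p.1 ≤ s) ∧
    (∀ p ∈ (pvDrain busy free s).1, p ∈ busy) ∧
    (((pvDrain busy free s).2 ++ ((pvDrain busy free s).1.map Prod.snd)).Perm
      (free ++ busy.map Prod.snd)) ∧
    (∀ r ∈ free, r ∈ (pvDrain busy free s).2) ∧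
    (∀ p ∈ busy, p.1 ≤ s → p.2 ∈ (pvDrain busy free s).2) ∧
    (∀ p ∈ busy, p.1 ≤ s ∨ p ∈ (pvDrain busy free s).1) := by
  intro busy
  induction busy with
  | nil =>
    intro free _ hf _
    simp [pvDrain, hf]
  | cons p t ih =>
    intro free hb hf hnd
    rw [List.pairwise_cons] at hb
    by_cases hps : p.1 ≤ s
    · have hstep : pvDrain (p :: t) free s = pvDrain t (pvInsortInt free p.2) s := by
        simp [pvDrain, hps]
      have hpf : p.2 ∉ free := by
        intro hmem
        have hdis := (List.nodup_append.1 hnd).2.2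
        exact hdis p.2 hmem p.2 (by simp) rfl
      have hf' : (pvInsortInt free p.2).Pairwise (· < ·) := pairwise_pvInsortInt _ _ hf hpf
      have hperm1 : (pvInsortInt free p.2 ++ t.map Prod.snd).Perm (free ++ (p :: t).map Prod.snd) := by
        have h1 : (pvInsortInt free p.2 ++ t.map Prod.snd).Perm ((p.2 :: free) ++ t.map Prod.snd) :=
          (perm_pvInsortInt free p.2).append_right _
        have h2 : ((p.2 :: free) ++ t.map Prod.snd).Perm (free ++ p.2 :: t.map Prod.snd) := by
          rw [List.cons_append]
          exact List.perm_middle.symm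
        have h3 : free ++ p.2 :: t.map Prod.snd = free ++ (p :: t).map Prod.snd := by simp
        exact (h1.trans h2).trans (h3 ▸ List.Perm.refl _)
      have hnd' : (pvInsortInt free p.2 ++ t.map Prod.snd).Nodup := by
        refine hperm1.symm.nodup ?_
        simpa using hnd
      obtain ⟨c1, c2, c3, c4, c5, c6, c7, c8⟩ := ih (pvInsortInt free p.2) hb.2 hf' hnd'
      rw [hstep]
      refine ⟨c1, c2, c3, fun q hq => List.mem_cons_of_mem _ (c4 q hq), ?_, ?_, ?_, ?_⟩
      · exact c5.trans hperm1
      · intro r hr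
        exact c6 r ((mem_pvInsortInt _ _ _).2 (Or.inr hr))
      · intro q hq hqs
        rcases List.mem_cons.1 hq with rfl | hq
        · exact c6 q.2 ((mem_pvInsortInt _ _ _).2 (Or.inl rfl))
        · exact c7 q hq hqs
      · intro q hq
        rcases List.mem_cons.1 hq with rfl | hq
        · exact Or.inl hps
        · exact c8 q hq
    · have hstep : pvDrain (p :: t) free s = (p :: t, free) := by
        simp [pvDrain, hps]
      rw [hstep]
      have h3 : ∀ q ∈ p :: t, ¬ q.1 ≤ s := by
        intro q hq
        rcases List.mem_cons.1 hq with rfl | hq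
        · exact hps
        · have := hb.1 q hq
          omega
      refine ⟨hf, List.pairwise_cons.2 hb, h3, fun q hq => hq, List.Perm.refl _, fun r hr => hr, ?_, fun q hq => Or.inr hq⟩
      intro q hq hqs
      exact absurd hqs (h3 q hq)

-- ========== getD helpers ==========
theorem pv_getD_set_self (l : List Int) (n : Nat) (e : Int) (h : n < l.length) :
    (l.set n e).getD n 0 = e := by
  simp [List.getD_eq_getElem?_getD, h]

theorem pv_getD_set_ne (l : List Int) (n j : Nat) (e : Int) (h : j ≠ n) :
    (l.set n e).getD j 0 = l.getD j 0 := by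
  simp [List.getD_eq_getElem?_getD, List.getElem?_set_ne (Ne.symm h)]

theorem pv_getD_append_left (l : List Int) (e : Int) (j : Nat) (h : j < l.length) :
    (l ++ [e]).getD j 0 = l.getD j 0 := by
  simp [List.getD_eq_getElem?_getD, List.getElem?_append_left h]

theorem pv_getD_append_self (l : List Int) (e : Int) :
    (l ++ [e]).getD l.length 0 = e := by
  simp [List.getD_eq_getElem?_getD]

-- ========== the invariant ==========
def pvInv (re : List Int) (busy : List (Int × Int)) (free : List Int) (k m : Int) : Prop :=
  free.Pairwise (· < ·) ∧
  busy.Pairwise (fun p q => p.1 ≤ q.1) ∧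
  (∀ r ∈ free, 0 ≤ r ∧ r < (re.length : Int) ∧ re.getD r.toNat 0 ≤ m) ∧
  (∀ p ∈ busy, 0 ≤ p.2 ∧ p.2 < (re.length : Int) ∧ re.getD p.2.toNat 0 = p.1) ∧
  (free ++ busy.map Prod.snd).Perm (PySem.List.pyRange 0 (re.length : Int)) ∧
  k = (re.length : Int)

-- ========== the step lemma ==========
theorem pvStep_eq (starts ends : List Int) (re : List Int) (busy : List (Int × Int))
    (free : List Int) (rows : List Int) (k m i : Int)
    (hInv : pvInv re busy free k m) (hms : m ≤ PySem.List.pyGetD starts i 0) :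
    (pvStepA starts ends (re, rows) i).2 = (pvStepB starts ends (busy, free, rows, k) i).2.2.1 ∧
    pvInv (pvStepA starts ends (re, rows) i).1
          (pvStepB starts ends (busy, free, rows, k) i).1
          (pvStepB starts ends (busy, free, rows, k) i).2.1
          (pvStepB starts ends (busy, free, rows, k) i).2.2.2
          (PySem.List.pyGetD starts i 0) := by
  obtain ⟨hfP, hbP, hM1, hM2, hPerm, hk⟩ := hInv
  set s := PySem.List.pyGetD starts i 0 with hs
  set e := PySem.List.pyGetD ends i 0 with he
  have hnd : (free ++ busy.map Prod.snd).Nodup :=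
    hPerm.nodup_iff.2 (PySem.List.nodup_pyRange_one _ _)
  obtain ⟨c1, c2, c3, c4, c5, c6, c7, c8⟩ := pvDrain_spec s busy free hbP hfP hnd
  obtain ⟨b', f', hdr⟩ : ∃ b f, pvDrain busy free s = (b, f) := ⟨_, _, rfl⟩
  simp only [hdr] at c1 c2 c3 c4 c5 c6 c7 c8
  have hnd' : (f' ++ b'.map Prod.snd).Nodup := c5.nodup_iff.2 hnd
  have hmemf : ∀ r : Int, r ∈ f' ↔ 0 ≤ r ∧ r < (re.length : Int) ∧ re.getD r.toNat 0 ≤ s := by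
    intro r
    constructor
    · intro hr
      have hr2 : r ∈ free ++ busy.map Prod.snd := c5.subset (List.mem_append_left _ hr)
      rcases List.mem_append.1 hr2 with hfr | hbr
      · obtain ⟨h0, h1, h2⟩ := hM1 r hfr
        exact ⟨h0, h1, le_trans h2 hms⟩
      · obtain ⟨p, hp, rfl⟩ := List.mem_map.1 hbr
        obtain ⟨h0, h1, h2⟩ := hM2 p hp
        have hps : p.1 ≤ s := by
          by_contra hnot
          rcases c8 p hp with h | h
          · exact hnot h
          · have hin : p.2 ∈ b'.map Prod.snd := List.mem_map.2 ⟨p, h, rfl⟩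
            have hdis := (List.nodup_append.1 hnd').2.2
            exact hdis p.2 hr p.2 hin rfl
        exact ⟨h0, h1, h2 ▸ hps⟩
    · rintro ⟨h0, h1, h2⟩
      have hr2 : r ∈ free ++ busy.map Prod.snd := by
        refine hPerm.symm.subset ?_
        exact PySem.List.mem_pyRange_one.2 ⟨h0, h1⟩
      rcases List.mem_append.1 hr2 with hfr | hbr
      · exact c6 r hfr
      · obtain ⟨p, hp, rfl⟩ := List.mem_map.1 hbr
        obtain ⟨h0', h1', h2'⟩ := hM2 p hp
        exact c7 p hp (h2' ▸ h2)
  cases f' with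
  | nil =>
    have hstepB : pvStepB starts ends (busy, free, rows, k) i =
        (pvInsortPair b' (e, k), [], rows.set i.toNat k, k + 1) := by
      simp only [pvStepB, ← hs, ← he, hdr]
    have hscan : pvScanA re s = none := by
      apply pvScanA_none_of
      intro j hj hle
      have hjm : (j : Int) ∈ ([] : List Int) :=
        (hmemf j).2 ⟨by omega, by omega, by simpa using hle⟩
      simp at hjm
    have hstepA : pvStepA starts ends (re, rows) i =
        (re ++ [e], rows.set i.toNat (re.length : Int)) := by
      simp only [pvStepA, ← hs, ← he, hscan]
    rw [hstepA, hstepB]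
    refine ⟨by simp [hk], ?_⟩
    refine ⟨List.Pairwise.nil, pairwise_pvInsortPair _ _ c2, by simp, ?_, ?_, ?_⟩
    · intro q hq
      rcases (mem_pvInsortPair _ _ _).1 hq with rfl | hq
      · refine ⟨by omega, ?_, ?_⟩
        · simp only [List.length_append, List.length_cons, List.length_nil]
          omega
        · have hkn : k.toNat = re.length := by omega
          rw [hkn, pv_getD_append_self]
      · obtain ⟨h0, h1, h2⟩ := hM2 q (c4 q hq)
        refine ⟨h0, ?_, ?_⟩
        · simp only [List.length_append, List.length_cons, List.length_nil]
          omega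
        · rw [pv_getD_append_left _ _ _ (by omega)]
          exact h2
    · have hmap : List.Perm ((pvInsortPair b' (e, k)).map Prod.snd) (k :: b'.map Prod.snd) :=
        (perm_pvInsortPair b' (e, k)).map Prod.snd
      have hc5' : List.Perm (b'.map Prod.snd) (PySem.List.pyRange 0 (re.length : Int)) := by
        simpa using c5.trans hPerm
      have hrange : PySem.List.pyRange 0 ((re.length : Int) + 1) =
          PySem.List.pyRange 0 (re.length : Int) ++ [(re.length : Int)] :=
        PySem.List.pyRange_one_succ_right (by omega)
      have hmain : List.Perm ((pvInsortPair b' (e, k)).map Prod.snd)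
          (PySem.List.pyRange 0 ((re.length : Int) + 1)) := by
        rw [hrange]
        refine hmap.trans ?_
        refine (hc5'.cons k).trans ?_
        rw [hk]
        exact (List.perm_append_singleton _ _).symm
      have hlen : (((re ++ [e]).length : Nat) : Int) = (re.length : Int) + 1 := by
        simp
      simpa [hlen] using hmain
    · simp only [List.length_append, List.length_cons, List.length_nil]
      push_cast
      omega
  | cons r rest =>
    have hstepB : pvStepB starts ends (busy, free, rows, k) i =
        (pvInsortPair b' (e, r), rest, rows.set i.toNat r, k) := by
      simp only [pvStepB, ← hs, ← he, hdr]
    have hrmem : 0 ≤ r ∧ r < (re.length : Int) ∧ re.getD r.toNat 0 ≤ s :=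
      (hmemf r).1 List.mem_cons_self
    have hscan : pvScanA re s = some r.toNat := by
      apply pvScanA_some_of
      · omega
      · exact hrmem.2.2
      · intro j' hj' hle
        have hjmem : (j' : Int) ∈ r :: rest :=
          (hmemf j').2 ⟨by omega, by omega, by simpa using hle⟩
        rcases List.mem_cons.1 hjmem with h | h
        · omega
        · have := (List.pairwise_cons.1 c1).1 _ h
          omega
    have hstepA : pvStepA starts ends (re, rows) i =
        (re.set r.toNat e, rows.set i.toNat ((r.toNat : Nat) : Int)) := by
      simp only [pvStepA, ← hs, ← he, hscan]
    have hcast : ((r.toNat : Nat) : Int) = r := Int.toNat_of_nonneg hrmem.1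
    rw [hstepA, hstepB]
    refine ⟨by simp [hcast], ?_⟩
    have hlen' : (((re.set r.toNat e).length : Nat) : Int) = (re.length : Int) := by simp
    have hrest_ne : ∀ x ∈ rest, r < x := (List.pairwise_cons.1 c1).1
    have hb'ne : ∀ q ∈ b', q.2 ≠ r := by
      intro q hq hqr
      have hin : q.2 ∈ b'.map Prod.snd := List.mem_map.2 ⟨q, hq, rfl⟩
      have hdis := (List.nodup_append.1 hnd').2.2
      exact hdis r List.mem_cons_self q.2 hin hqr.symm
    refine ⟨(List.pairwise_cons.1 c1).2, pairwise_pvInsortPair _ _ c2, ?_, ?_, ?_, ?_⟩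
    · intro x hx
      obtain ⟨h0, h1, h2⟩ := (hmemf x).1 (List.mem_cons_of_mem _ hx)
      refine ⟨h0, by rw [hlen']; exact h1, ?_⟩
      rw [pv_getD_set_ne _ _ _ _ (by have := hrest_ne x hx; omega)]
      exact h2
    · intro q hq
      rcases (mem_pvInsortPair _ _ _).1 hq with rfl | hq
      · refine ⟨hrmem.1, by rw [hlen']; exact hrmem.2.1, ?_⟩
        rw [pv_getD_set_self _ _ _ (by omega)]
      · obtain ⟨h0, h1, h2⟩ := hM2 q (c4 q hq)
        refine ⟨h0, by rw [hlen']; exact h1, ?_⟩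
        rw [pv_getD_set_ne _ _ _ _ (by have := hb'ne q hq; omega)]
        exact h2
    · have hmap : List.Perm ((pvInsortPair b' (e, r)).map Prod.snd) (r :: b'.map Prod.snd) :=
        (perm_pvInsortPair b' (e, r)).map Prod.snd
      have h1 : List.Perm (rest ++ (pvInsortPair b' (e, r)).map Prod.snd)
          (rest ++ r :: b'.map Prod.snd) := hmap.append_left _
      have h2 : List.Perm (rest ++ r :: b'.map Prod.snd) (r :: (rest ++ b'.map Prod.snd)) :=
        List.perm_middle
      have h3 : r :: (rest ++ b'.map Prod.snd) = (r :: rest) ++ b'.map Prod.snd := rfl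
      have h4 : List.Perm ((r :: rest) ++ b'.map Prod.snd)
          (PySem.List.pyRange 0 (re.length : Int)) := c5.trans hPerm
      rw [List.length_set]
      exact ((h1.trans h2).trans (h3 ▸ h4))
    · rw [hlen']
      exact hk

-- ========== the fold lemma ==========
theorem pvFold_eq (starts ends : List Int) :
    ∀ (l : List Int) (stA : List Int × List Int)
      (stB : List (Int × Int) × List Int × List Int × Int) (m : Int),
    pvInv stA.1 stB.1 stB.2.1 stB.2.2.2 m →
    stA.2 = stB.2.2.1 →
    (∀ i ∈ l, m ≤ PySem.List.pyGetD starts i 0) →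
    l.Pairwise (fun i j => PySem.List.pyGetD starts i 0 ≤ PySem.List.pyGetD starts j 0) →
    (l.foldl (pvStepA starts ends) stA).2 = (l.foldl (pvStepB starts ends) stB).2.2.1 := by
  intro l
  induction l with
  | nil =>
    intro stA stB m _ heq _ _
    exact heq
  | cons i t ih =>
    intro stA stB m hInv heq hlb hpw
    obtain ⟨re, rowsA⟩ := stA
    obtain ⟨busy, free, rowsB, k⟩ := stB
    simp only at hInv heq
    subst heq
    obtain ⟨heq', hInv'⟩ := pvStep_eq starts ends re busy free rowsA k m i hInv (hlb i (by simp))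
    simp only [List.foldl_cons]
    refine ih (pvStepA starts ends (re, rowsA) i) (pvStepB starts ends (busy, free, rowsA, k) i)
      (PySem.List.pyGetD starts i 0) hInv' heq' ?_ ?_
    · intro j hj
      exact (List.pairwise_cons.1 hpw).1 j hj
    · exact (List.pairwise_cons.1 hpw).2

-- ========== sorted2 is nondecreasing in the first key ==========
theorem pv_sorted2_eq (xs : List Int) (k1 k2 : Int → Int) :
    PySem.List.sorted2 xs k1 k2 = xs.foldl (fun acc x => PySem.List.insertBy
      (fun a b => decide (k1 a < k1 b) || (!decide (k1 b < k1 a) && decide (k2 a < k2 b))) x acc) [] := rfl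

theorem pv_insertBy_pairwise (k1 k2 : Int → Int) (x : Int) (l : List Int)
    (h : l.Pairwise (fun a b =>
      (decide (k1 b < k1 a) || (!decide (k1 a < k1 b) && decide (k2 b < k2 a))) = false)) :
    (PySem.List.insertBy
      (fun a b => decide (k1 a < k1 b) || (!decide (k1 b < k1 a) && decide (k2 a < k2 b))) x l).Pairwise
      (fun a b => (decide (k1 b < k1 a) || (!decide (k1 a < k1 b) && decide (k2 b < k2 a))) = false) := by
  induction l with
  | nil => simp [PySem.List.insertBy]
  | cons y t ih =>
    rw [List.pairwise_cons] at h
    simp only [PySem.List.insertBy]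
    split
    · rename_i hxy
      rw [List.pairwise_cons]
      constructor
      · intro w hw
        simp only [Bool.or_eq_true, Bool.and_eq_true, Bool.not_eq_eq_eq_not, Bool.not_true,
          decide_eq_true_eq, decide_eq_false_iff_not] at hxy
        rcases List.mem_cons.1 hw with rfl | hw
        · simp only [Bool.or_eq_false_iff, Bool.and_eq_false_iff, Bool.not_eq_eq_eq_not,
            Bool.not_false, decide_eq_false_iff_not, decide_eq_true_eq]
          omega
        · have hyw := h.1 w hw
          simp only [Bool.or_eq_false_iff, Bool.and_eq_false_iff, Bool.not_eq_eq_eq_not,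
            Bool.not_false, decide_eq_false_iff_not, decide_eq_true_eq] at hyw ⊢
          omega
      · exact List.pairwise_cons.2 h
    · rename_i hxy
      rw [List.pairwise_cons]
      constructor
      · intro w hw
        have hmem := (PySem.List.mem_insertBy _ _ _ _).1 hw
        simp only [Bool.or_eq_true, Bool.and_eq_true, Bool.not_eq_eq_eq_not, Bool.not_true,
          decide_eq_true_eq, decide_eq_false_iff_not] at hxy
        rcases hmem with rfl | hw'
        · simp only [Bool.or_eq_false_iff, Bool.and_eq_false_iff, Bool.not_eq_eq_eq_not,
            Bool.not_false, decide_eq_false_iff_not, decide_eq_true_eq]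
          omega
        · exact h.1 w hw'
      · exact ih h.2

theorem pv_sorted2_pairwise (xs : List Int) (k1 k2 : Int → Int) :
    (PySem.List.sorted2 xs k1 k2).Pairwise (fun a b => k1 a ≤ k1 b) := by
  rw [pv_sorted2_eq]
  have haux : ∀ (ys : List Int) (acc : List Int),
      acc.Pairwise (fun a b =>
        (decide (k1 b < k1 a) || (!decide (k1 a < k1 b) && decide (k2 b < k2 a))) = false) →
      (ys.foldl (fun acc x => PySem.List.insertBy
        (fun a b => decide (k1 a < k1 b) || (!decide (k1 b < k1 a) && decide (k2 a < k2 b))) x acc) acc).Pairwise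
        (fun a b => (decide (k1 b < k1 a) || (!decide (k1 a < k1 b) && decide (k2 b < k2 a))) = false) := by
    intro ys
    induction ys with
    | nil => intro acc h; exact h
    | cons x t ih =>
      intro acc h
      exact ih _ (pv_insertBy_pairwise k1 k2 x acc h)
  refine (haux xs [] List.Pairwise.nil).imp ?_
  intro a b hab
  simp only [Bool.or_eq_false_iff, Bool.and_eq_false_iff, Bool.not_eq_eq_eq_not, Bool.not_false,
    decide_eq_false_iff_not, decide_eq_true_eq] at hab
  omega

theorem pvInv_init (m : Int) : pvInv [] [] [] 0 m := by
  refine ⟨List.Pairwise.nil, List.Pairwise.nil, by simp, by simp, ?_, by simp⟩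
  simp only [List.length_nil, Nat.cast_zero, List.map_nil, List.append_nil]
  rw [PySem.List.pyRange_one_eq_nil (by omega)]


-- ===== VERDICT (by name: the statement is the Claim_ definition above) =====
theorem greedy_row_assign_spec : Claim_equal_greedy_row_assign := by
  unfold Claim_equal_greedy_row_assign
  intro starts ends _ _
  unfold Spec_greedy_row_assign greedy_row_assign greedy_row_assign_alt
  by_cases hn : starts.length = 0
  · simp [hn]
  · simp only [if_neg hn]
    have hpw := pv_sorted2_pairwise (PySem.List.pyRange 0 (starts.length : Int))
      (fun i => PySem.List.pyGetD starts i 0) (fun i => PySem.List.pyGetD ends i 0)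
    generalize hidx : PySem.List.sorted2 (PySem.List.pyRange 0 (starts.length : Int))
      (fun i => PySem.List.pyGetD starts i 0) (fun i => PySem.List.pyGetD ends i 0) = l at hpw ⊢
    cases l with
    | nil => rfl
    | cons i0 t =>
      refine pvFold_eq starts ends (i0 :: t) ([], List.replicate starts.length 0)
        ([], [], List.replicate starts.length 0, 0) (PySem.List.pyGetD starts i0 0)
        (pvInv_init _) rfl ?_ hpw
      intro j hj
      rcases List.mem_cons.1 hj with rfl | hj
      · exact le_refl _
      · exact (List.pairwise_cons.1 hpw).1 j hj
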